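-- pv_equiv track=rewrite | github.com/lquimaz1809/practica_pki_python | app.py | parse_dn
-- ===== SOURCE A (Python) =====
-- from typing import Tuple, List, Dict, Any
--
-- def parse_dn(dn: str) -> Tuple[str, str]:
--     nombre = "Desconocido"
--     email = "No disponible"
--     # Ajuste para formato estándar de OpenSSL (ej: /C=ES/CN=Piero...)
--     if dn:
--         partes = dn.split("/")
--         for p in partes:
--             p = p.strip()
--             if p.startswith("CN="):
--                 nombre = p.replace("CN=", "", 1)
--             elif p.startswith("emailAddress="):
--                 email = p.replace("emailAddress=", "", 1)
--     return nombre, email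
-- ===== SOURCE B (Python) =====
-- def parse_dn(dn: str):
--     # Build a key->value table from the DN parts, then look up the two fields.
--     parsed = {}
--     if dn:
--         for part in dn.split("/"):
--             part = part.strip()
--             i = part.find("=")
--             if i != -1:
--                 parsed[part[:i]] = part[i + 1:]
--     return parsed.get("CN", "Desconocido"), parsed.get("emailAddress", "No disponible")
-- ===== Notes on version B (the rewrite author's own statement) =====
-- stated objective: idiomatic
-- what changed: B parses the whole DN into a key->value dict (last key wins) by splitting each part at its first equals sign, then answers both fields by dict lookup with defaults, replacing A's inline per-field prefix-matching branches and replace() calls.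
import Mathlib
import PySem

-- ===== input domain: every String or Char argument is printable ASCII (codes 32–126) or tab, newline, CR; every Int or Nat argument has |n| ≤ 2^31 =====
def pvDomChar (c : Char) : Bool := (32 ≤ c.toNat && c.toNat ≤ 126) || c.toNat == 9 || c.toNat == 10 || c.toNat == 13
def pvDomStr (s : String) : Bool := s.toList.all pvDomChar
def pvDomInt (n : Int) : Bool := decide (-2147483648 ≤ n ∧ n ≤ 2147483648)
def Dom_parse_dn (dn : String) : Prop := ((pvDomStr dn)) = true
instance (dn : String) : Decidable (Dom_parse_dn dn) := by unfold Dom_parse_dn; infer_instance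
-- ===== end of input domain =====

-- B parses the DN into a key->value dict by splitting each part at its first equals sign, then
-- answers both fields by lookup with defaults, instead of A's per-field prefix branches (idiomatic).


-- ===== PORT A =====
-- hand port of s.replace(old, new, 1) (exact for old ≠ ""): splice at the first occurrence
def pvReplace1 (s old new : List Char) : List Char :=
  let i := PySem.Chars.find s old
  if i < 0 then s else s.take i.toNat ++ new ++ s.drop (i.toNat + old.length)

def pvStepA (st : String × String) (p : String) : String × String :=
  let q := PySem.Str.strip p
  if PySem.Str.startswith q "CN=" then
    (String.ofList (pvReplace1 q.toList "CN=".toList "".toList), st.2)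
  else if PySem.Str.startswith q "emailAddress=" then
    (st.1, String.ofList (pvReplace1 q.toList "emailAddress=".toList "".toList))
  else st

def parse_dn (dn : String) : String × String :=
  let nombre := "Desconocido"
  let email := "No disponible"
  if dn = "" then (nombre, email)
  else ((PySem.Str.split? dn "/").getD []).foldl pvStepA (nombre, email)

-- ===== PORT B =====
def pvStepB (d : PySem.Dict String String) (p : String) : PySem.Dict String String :=
  let q := PySem.Str.strip p
  let i := PySem.Str.find q "="
  if i ≠ -1 then
    d.insert (PySem.Str.slice q none (some i)) (PySem.Str.slice q (some (i + 1)) none)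
  else d

def parse_dn_alt (dn : String) : String × String :=
  let parsed : PySem.Dict String String :=
    if dn = "" then PySem.Dict.empty
    else ((PySem.Str.split? dn "/").getD []).foldl pvStepB PySem.Dict.empty
  (parsed.getD "CN" "Desconocido", parsed.getD "emailAddress" "No disponible")

-- ===== PRECONDITION & SPEC =====
def Spec_parse_dn (dn : String) (out : String × String) : Prop := out = parse_dn_alt dn
instance (dn : String) (out : String × String) : Decidable (Spec_parse_dn dn out) := by unfold Spec_parse_dn; infer_instance

-- ===== CLAIM (what is proved, stated in full; the proofs are below) =====
def Claim_equal_parse_dn : Prop := ∀ (dn : String), Dom_parse_dn dn → Spec_parse_dn dn (parse_dn dn)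

-- ===== LEMMAS AND PROOFS =====

-- [c] is an infix iff c is a member
lemma pv_singleton_infix {c : Char} {l : List Char} : [c] <:+: l ↔ c ∈ l := by
  constructor
  · rintro ⟨s, t, h⟩; subst h; simp
  · intro h
    rcases List.mem_iff_append.mp h with ⟨s, t, h⟩
    exact ⟨s, t, by simp [h]⟩

-- decomposition at the FIRST occurrence of '='
lemma pv_exists_first {l : List Char} (h : '=' ∈ l) :
    ∃ pre rest, l = pre ++ '=' :: rest ∧ '=' ∉ pre := by
  induction l with
  | nil => cases h
  | cons a l ih =>
    by_cases ha : a = '='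
    · exact ⟨[], l, by simp [ha], by simp⟩
    · have hm : '=' ∈ l := by
        rcases List.mem_cons.mp h with h' | h'
        · exact absurd h'.symm ha
        · exact h'
      rcases ih hm with ⟨pre, rest, h1, h2⟩
      exact ⟨a :: pre, rest, by simp [h1], by
        intro hc
        rcases List.mem_cons.mp hc with h' | h'
        · exact ha h'.symm
        · exact h2 h'⟩

-- first-occurrence decompositions are unique
lemma pv_first_unique : ∀ (p1 p2 r1 r2 : List Char), '=' ∉ p1 → '=' ∉ p2 →
    p1 ++ '=' :: r1 = p2 ++ '=' :: r2 → p1 = p2 ∧ r1 = r2 := by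
  intro p1
  induction p1 with
  | nil =>
    intro p2 r1 r2 _ h2 heq
    cases p2 with
    | nil => simpa using heq
    | cons b p2 =>
      simp at heq
      exact absurd (heq.1 ▸ List.mem_cons_self) h2
  | cons a p1 ih =>
    intro p2 r1 r2 h1 h2 heq
    cases p2 with
    | nil =>
      simp at heq
      exact absurd (heq.1 ▸ List.mem_cons_self) h1
    | cons b p2 =>
      simp at heq
      obtain ⟨rfl, heq⟩ := heq
      have := ih p2 r1 r2 (fun h => h1 (List.mem_cons_of_mem _ h))
        (fun h => h2 (List.mem_cons_of_mem _ h)) heq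
      exact ⟨by rw [this.1], this.2⟩

-- find of a prefix is 0
lemma pv_find_of_prefix {sub l : List Char} (h : sub <+: l) : PySem.Chars.find l sub = 0 := by
  have hinf : sub <:+: l := h.isInfix
  have hnn : 0 ≤ PySem.Chars.find l sub := (PySem.Chars.find_nonneg_iff _ _).mpr hinf
  have hspec := PySem.Chars.find_spec (s := l) (sub := sub) hnn
  by_contra hne
  have hpos : 0 < (PySem.Chars.find l sub).toNat := by omega
  exact hspec.2 0 hpos (by simpa using h)

-- find '=' in pre ++ '=' :: rest is pre.length when '=' ∉ pre
lemma pv_find_first {pre rest : List Char} (h : '=' ∉ pre) :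
    PySem.Chars.find (pre ++ '=' :: rest) ['='] = (pre.length : Int) := by
  set l := pre ++ '=' :: rest with hl
  have hinf : ['='] <:+: l := pv_singleton_infix.mpr (by simp [hl])
  have hnn : 0 ≤ PySem.Chars.find l ['='] := (PySem.Chars.find_nonneg_iff _ _).mpr hinf
  have hspec := PySem.Chars.find_spec (s := l) (sub := ['=']) hnn
  set k := (PySem.Chars.find l ['=']).toNat with hk
  have hkp : ['='] <+: l.drop k := hspec.1
  rcases lt_trichotomy k pre.length with hlt | heq | hgt
  · exfalso
    rcases hkp with ⟨t, ht⟩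
    have h0 : (List.drop k l)[0]? = some '=' := by rw [← ht]; simp
    have hk? : l[k]? = some '=' := by
      rw [List.getElem?_drop] at h0; simpa using h0
    have hpe : pre[k]? = some '=' := by
      rw [hl] at hk?
      rwa [List.getElem?_append_left hlt] at hk?
    exact h (List.mem_of_getElem? hpe)
  · omega
  · exfalso
    apply hspec.2 pre.length hgt
    rw [hl, List.drop_left]
    exact ⟨rest, rfl⟩

-- no '=' in l means find = -1
lemma pv_find_none {l : List Char} (h : '=' ∉ l) : PySem.Chars.find l ['='] = -1 := by
  exact (PySem.Chars.find_eq_neg_one_iff _ _).mpr (fun hinf => h (pv_singleton_infix.mp hinf))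

-- strings are equal when their char lists are
lemma pv_str_ext {s t : String} (h : s.toList = t.toList) : s = t := by
  have := congrArg String.ofList h
  simpa using this

-- one loop step preserves the invariant
lemma pv_step (p : String) (d : PySem.Dict String String) (st : String × String)
    (h1 : st.1 = d.getD "CN" "Desconocido")
    (h2 : st.2 = d.getD "emailAddress" "No disponible") :
    (pvStepA st p).1 = (pvStepB d p).getD "CN" "Desconocido" ∧
    (pvStepA st p).2 = (pvStepB d p).getD "emailAddress" "No disponible" := by
  unfold pvStepA pvStepB
  set q := PySem.Str.strip p with hq
  have heq : ("=" : String).toList = ['='] := rfl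
  have hCNeq : ("CN=" : String).toList = 'C' :: 'N' :: '=' :: [] := rfl
  have hEMeq : ("emailAddress=" : String).toList =
      'e' :: 'm' :: 'a' :: 'i' :: 'l' :: 'A' :: 'd' :: 'd' :: 'r' :: 'e' :: 's' :: 's' :: '=' :: [] := rfl
  by_cases hm : '=' ∈ q.toList
  · obtain ⟨pre, rest, hdec, hnp⟩ := pv_exists_first hm
    have hfC : PySem.Chars.find q.toList ['='] = (pre.length : Int) := by
      rw [hdec]; exact pv_find_first hnp
    have hf : PySem.Str.find q "=" = (pre.length : Int) := by
      rw [PySem.Str.find_eq, heq, hfC]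
    have hfpos : ((pre.length : Nat) : Int) ≠ -1 := by omega
    have hkey : (PySem.Str.slice q none (some ((pre.length : Nat) : Int))).toList = pre := by
      rw [PySem.Str.toList_slice, PySem.Chars.slice_eq_listSlice, PySem.List.slice_to_natCast,
        hdec, List.take_left]
    have hval : (PySem.Str.slice q (some (((pre.length : Nat) : Int) + 1)) none).toList = rest := by
      rw [PySem.Str.toList_slice, PySem.Chars.slice_eq_listSlice]
      have : ((pre.length : Int) + 1) = ((pre.length + 1 : Nat) : Int) := by push_cast; ring
      rw [this, PySem.List.slice_from_natCast, hdec]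
      rw [show pre ++ '=' :: rest = (pre ++ ['=']) ++ rest by simp,
        show pre.length + 1 = (pre ++ ['=']).length by simp, List.drop_left]
    by_cases hCN : pre = ("CN" : String).toList
    · -- CN part
      have hdec' : q.toList = 'C' :: 'N' :: '=' :: rest := by rw [hdec, hCN]; rfl
      have hpref : ("CN=" : String).toList <+: q.toList := by
        rw [hCNeq, hdec']; exact ⟨rest, rfl⟩
      have hsw : PySem.Str.startswith q "CN=" = true := by
        rw [PySem.Str.startswith_eq]; exact (PySem.Chars.startswith_iff _ _).mpr hpref
      have hrep : pvReplace1 q.toList ("CN=" : String).toList ("" : String).toList = rest := by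
        unfold pvReplace1
        rw [pv_find_of_prefix hpref]
        simp [hdec']
      have hkeyS : PySem.Str.slice q none (some ((pre.length : Nat) : Int)) = "CN" := by
        apply pv_str_ext; rw [hkey, hCN]
      refine ⟨?_, ?_⟩
      · simp only [hsw, hf, if_true]
        rw [if_pos hfpos, hkeyS, PySem.Dict.getD_insert, if_pos rfl]
        apply pv_str_ext
        rw [String.toList_ofList, hrep, ← hval]
      · simp only [hsw, hf, if_true]
        rw [if_pos hfpos, hkeyS, PySem.Dict.getD_insert, if_neg (by decide)]
        exact h2
    · by_cases hEM : pre = ("emailAddress" : String).toList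
      · -- emailAddress part
        have hdec' : q.toList = 'e' :: 'm' :: 'a' :: 'i' :: 'l' :: 'A' :: 'd' :: 'd' :: 'r' ::
            'e' :: 's' :: 's' :: '=' :: rest := by rw [hdec, hEM]; rfl
        have hpref : ("emailAddress=" : String).toList <+: q.toList := by
          rw [hEMeq, hdec']; exact ⟨rest, rfl⟩
        have hsw : PySem.Str.startswith q "emailAddress=" = true := by
          rw [PySem.Str.startswith_eq]; exact (PySem.Chars.startswith_iff _ _).mpr hpref
        have hswC : PySem.Str.startswith q "CN=" = false := by
          rw [PySem.Str.startswith_eq]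
          apply Bool.eq_false_iff.mpr
          intro hc
          have := (PySem.Chars.startswith_iff _ _).mp hc
          rw [hCNeq, hdec'] at this
          exact absurd (List.cons_prefix_cons.mp this).1 (by decide)
        have hrep : pvReplace1 q.toList ("emailAddress=" : String).toList ("" : String).toList = rest := by
          unfold pvReplace1
          rw [pv_find_of_prefix hpref]
          simp [hdec']
        have hkeyS : PySem.Str.slice q none (some ((pre.length : Nat) : Int)) = "emailAddress" := by
          apply pv_str_ext; rw [hkey, hEM]
        refine ⟨?_, ?_⟩
        · simp only [hswC, hsw, hf, if_true, Bool.false_eq_true, if_false]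
          rw [if_pos hfpos, hkeyS, PySem.Dict.getD_insert, if_neg (by decide)]
          exact h1
        · simp only [hswC, hsw, hf, if_true, Bool.false_eq_true, if_false]
          rw [if_pos hfpos, hkeyS, PySem.Dict.getD_insert, if_pos rfl]
          apply pv_str_ext
          rw [String.toList_ofList, hrep, ← hval]
      · -- other key
        have hswC : PySem.Str.startswith q "CN=" = false := by
          rw [PySem.Str.startswith_eq]
          apply Bool.eq_false_iff.mpr
          intro hc
          obtain ⟨r', hr⟩ := (PySem.Chars.startswith_iff _ _).mp hc
          rw [hCNeq] at hr
          have : ('C' :: 'N' :: []) ++ '=' :: r' = pre ++ '=' :: rest := by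
            rw [← hdec, ← hr]; simp
          exact hCN ((pv_first_unique _ _ _ _ (by decide) hnp this).1.symm ▸ rfl)
        have hswE : PySem.Str.startswith q "emailAddress=" = false := by
          rw [PySem.Str.startswith_eq]
          apply Bool.eq_false_iff.mpr
          intro hc
          obtain ⟨r', hr⟩ := (PySem.Chars.startswith_iff _ _).mp hc
          rw [hEMeq] at hr
          have : ('e' :: 'm' :: 'a' :: 'i' :: 'l' :: 'A' :: 'd' :: 'd' :: 'r' :: 'e' :: 's' :: 's' :: [])
              ++ '=' :: r' = pre ++ '=' :: rest := by
            rw [← hdec, ← hr]; simp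
          exact hEM ((pv_first_unique _ _ _ _ (by decide) hnp this).1.symm ▸ rfl)
        have hkC : PySem.Str.slice q none (some ((pre.length : Nat) : Int)) ≠ "CN" := by
          intro hc; exact hCN (by rw [← hkey, hc])
        have hkE : PySem.Str.slice q none (some ((pre.length : Nat) : Int)) ≠ "emailAddress" := by
          intro hc; exact hEM (by rw [← hkey, hc])
        refine ⟨?_, ?_⟩
        · simp only [hswC, hswE, hf, Bool.false_eq_true, if_false]
          rw [if_pos hfpos, PySem.Dict.getD_insert, if_neg (fun hc => hkC hc.symm)]
          exact h1
        · simp only [hswC, hswE, hf, Bool.false_eq_true, if_false]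
          rw [if_pos hfpos, PySem.Dict.getD_insert, if_neg (fun hc => hkE hc.symm)]
          exact h2
  · -- no '=' in the stripped part: both sides skip
    have hf : PySem.Str.find q "=" = -1 := by
      rw [PySem.Str.find_eq, heq]; exact pv_find_none hm
    have hswC : PySem.Str.startswith q "CN=" = false := by
      rw [PySem.Str.startswith_eq]
      apply Bool.eq_false_iff.mpr
      intro hc
      have := ((PySem.Chars.startswith_iff _ _).mp hc).isInfix
      exact hm (List.IsInfix.mem (by rw [hCNeq]; simp) this)
    have hswE : PySem.Str.startswith q "emailAddress=" = false := by
      rw [PySem.Str.startswith_eq]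
      apply Bool.eq_false_iff.mpr
      intro hc
      have := ((PySem.Chars.startswith_iff _ _).mp hc).isInfix
      exact hm (List.IsInfix.mem (by rw [hEMeq]; simp) this)
    simp only [hswC, hswE, hf, Bool.false_eq_true, if_false]
    rw [if_neg (show ¬(-1 : Int) ≠ -1 by omega)]
    exact ⟨h1, h2⟩

-- the folds preserve the invariant
lemma pv_loop (ps : List String) (d : PySem.Dict String String) (st : String × String)
    (h1 : st.1 = d.getD "CN" "Desconocido")
    (h2 : st.2 = d.getD "emailAddress" "No disponible") :
    (ps.foldl pvStepA st).1 = (ps.foldl pvStepB d).getD "CN" "Desconocido" ∧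
    (ps.foldl pvStepA st).2 = (ps.foldl pvStepB d).getD "emailAddress" "No disponible" := by
  induction ps generalizing d st with
  | nil => exact ⟨h1, h2⟩
  | cons p ps ih =>
    simp only [List.foldl_cons]
    have h := pv_step p d st h1 h2
    exact ih (pvStepB d p) (pvStepA st p) h.1 h.2

-- ===== VERDICT (by name: the statement is the Claim_ definition above) =====
theorem parse_dn_spec : Claim_equal_parse_dn := by
  intro dn _
  unfold Spec_parse_dn parse_dn parse_dn_alt
  by_cases h : dn = ""
  · subst h
    simp [PySem.Dict.getD_empty]
  · simp only [h, ite_false]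
    have := pv_loop ((PySem.Str.split? dn "/").getD []) PySem.Dict.empty
        ("Desconocido", "No disponible") (by rw [PySem.Dict.getD_empty]) (by rw [PySem.Dict.getD_empty])
    exact Prod.ext this.1 this.2
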